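-- pv_equiv track=rewrite | github.com/gabrieldantasoli/firstsemesterfilesUFCG | ofuscador.py | ofuscador
-- ===== SOURCE A (Python) =====
-- def ofuscador(linha):
--     lista = []
--     lista2 = linha.split(' ')
--     espacos = 0
--     for c in range(len(linha)):
--         if linha[c] == ' ':
--             espaco = '*'*len(lista2[espacos])
--             lista.append(espaco)
--             espacos += 1
--         elif ord(linha[c]) >= 65 and ord(linha[c]) <= 122:
--             if ord(linha[c]) >= 97:
--                 lista.append(chr(ord(linha[c]) - 32))
--             elif ord(linha[c]) < 97:
--                 lista.append(chr(ord(linha[c]) + 32))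
--         else:
--             lista.append(linha[c])
--
--     for c in range(len(lista)):
--                 if lista[c] == 'a' or lista[c] == 'A':
--                     lista[c] = 4
--                 elif lista[c] == 'b' or lista[c] == 'B':
--                     lista[c] = 8
--                 elif lista[c] == 'e' or lista[c] == 'E':
--                     lista[c] = 3
--                 elif lista[c] == 'g' or lista[c] == 'G':
--                     lista[c] = 6
--                 elif lista[c] == 'i' or lista[c] == 'I':
--                     lista[c] = 1
--                 elif lista[c] == 'l' or lista[c] == 'L':
--                     lista[c] = 7
--                 elif lista[c] == 's' or lista[c] == 'S':
--                     lista[c] = 5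
--                 elif lista[c] == 'o' or lista[c] == 'O':
--                     lista[c] = 0
--     retorno = ''
--     for c in lista:
--         retorno += str(c)
--     return retorno
-- ===== SOURCE B (Python) =====
-- LEET = {'a': '4', 'A': '4', 'b': '8', 'B': '8', 'e': '3', 'E': '3',
--         'g': '6', 'G': '6', 'i': '1', 'I': '1', 'l': '7', 'L': '7',
--         's': '5', 'S': '5', 'o': '0', 'O': '0'}
--
--
-- def ofuscador(linha):
--     def tr(word):
--         out = []
--         for ch in word:
--             if ch in LEET:
--                 out.append(LEET[ch])
--             else:
--                 o = ord(ch)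
--                 if 65 <= o <= 122:
--                     out.append(chr(o - 32) if o >= 97 else chr(o + 32))
--                 else:
--                     out.append(ch)
--         return ''.join(out)
--
--     words = linha.split(' ')
--     res = tr(words[0])
--     for prev, w in zip(words, words[1:]):
--         res += '*' * len(prev) + tr(w)
--     return res
-- ===== Notes on version B (the rewrite author's own statement) =====
-- stated objective: simpler
-- what changed: B splits the line into words once and maps each character of each word through a single swap-then-leet lookup, joining the transformed words with runs of asterisks sized by the previous word, replacing A's index loop with its espacos counter, the separate in-place leet pass over a mixed str/int list, and the per-character string-accumulation loop.
import Mathlib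
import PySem

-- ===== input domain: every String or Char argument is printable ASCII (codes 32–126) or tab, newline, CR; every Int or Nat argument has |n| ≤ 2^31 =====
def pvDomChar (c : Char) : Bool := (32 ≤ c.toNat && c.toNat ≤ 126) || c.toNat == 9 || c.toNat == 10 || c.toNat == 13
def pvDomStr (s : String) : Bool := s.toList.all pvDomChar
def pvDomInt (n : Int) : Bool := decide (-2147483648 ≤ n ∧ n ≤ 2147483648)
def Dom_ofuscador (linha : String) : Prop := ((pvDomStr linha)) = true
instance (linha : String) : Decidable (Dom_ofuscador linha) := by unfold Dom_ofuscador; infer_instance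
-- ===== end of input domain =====

-- B replaces A's index loop with its spaces counter, the in-place leet pass and the final
-- string-accumulation loop by a split-words decomposition: transform each word once with a
-- per-character map (leet dict looked up on the case-swapped letter), and join the transformed
-- words with runs of asterisks sized by the previous word (objective: simpler).

-- ===== PORT A =====
-- A's elif-chain on ord(linha[c]) for a non-space character (appends exactly one 1-char string)
def pvEntryA (c : Char) : List Char :=
  if 65 ≤ c.toNat ∧ c.toNat ≤ 122 then
    if 97 ≤ c.toNat then [Char.ofNat (c.toNat - 32)]
    else [Char.ofNat (c.toNat + 32)]
  else [c]

-- one iteration of A's first loop; state = (lista, espacos).  lista2[espacos] is ported with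
-- pyGetD: the index is always in range here (espacos counts spaces already seen, and split(' ')
-- returns one more piece than there are spaces), so Python never raises on this lookup.
def pvStepA (lista2 : List (List Char)) (st : List (List Char) × Int) (c : Char) :
    List (List Char) × Int :=
  if c = ' ' then
    (st.1 ++ [List.replicate (PySem.List.pyGetD lista2 st.2 []).length '*'], st.2 + 1)
  else
    (st.1 ++ [pvEntryA c], st.2)

-- A's second loop body: replace a leet letter entry by the Python int A stores in the list
def pvLeetA (e : List Char) : List Char ⊕ Int :=
  if e = ['a'] ∨ e = ['A'] then Sum.inr 4
  else if e = ['b'] ∨ e = ['B'] then Sum.inr 8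
  else if e = ['e'] ∨ e = ['E'] then Sum.inr 3
  else if e = ['g'] ∨ e = ['G'] then Sum.inr 6
  else if e = ['i'] ∨ e = ['I'] then Sum.inr 1
  else if e = ['l'] ∨ e = ['L'] then Sum.inr 7
  else if e = ['s'] ∨ e = ['S'] then Sum.inr 5
  else if e = ['o'] ∨ e = ['O'] then Sum.inr 0
  else Sum.inl e

def ofuscador (linha : String) : String :=
  let cs := linha.toList
  let lista2 := PySem.Chars.splitOn cs [' ']
  let lista := (cs.foldl (pvStepA lista2) ([], 0)).1
  let lista' := lista.map pvLeetA
  String.ofList (lista'.foldl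
    (fun r e => r ++ (match e with | Sum.inl s => s | Sum.inr n => PySem.Int.toChars n)) [])

-- ===== PORT B =====
-- B's LEET dict (both cases as keys, so the lookup happens on the case-swapped character too)
def pvLeetDict : PySem.Dict Char Char :=
  PySem.Dict.mk [('a','4'),('A','4'),('b','8'),('B','8'),('e','3'),('E','3'),('g','6'),('G','6'),
                 ('i','1'),('I','1'),('l','7'),('L','7'),('s','5'),('S','5'),('o','0'),('O','0')]

def pvTrChar (c : Char) : Char :=
  match PySem.Dict.get? pvLeetDict c with
  | some d => d
  | none =>
    if 65 ≤ c.toNat ∧ c.toNat ≤ 122 then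
      if 97 ≤ c.toNat then Char.ofNat (c.toNat - 32) else Char.ofNat (c.toNat + 32)
    else c

-- B's tr(word): the out-append loop followed by ''.join(out)
def pvTr (w : List Char) : List Char := w.foldl (fun acc c => acc ++ [pvTrChar c]) []

def ofuscador_alt (linha : String) : String :=
  match PySem.Chars.splitOn linha.toList [' '] with
  | [] => ""   -- unreachable: split(' ') always returns at least one piece
  | w :: ws =>
      String.ofList (((w :: ws).zip ws).foldl
        (fun acc p => acc ++ List.replicate p.1.length '*' ++ pvTr p.2) (pvTr w))

-- ===== PRECONDITION & SPEC =====
def Spec_ofuscador (linha : String) (out : String) : Prop := out = ofuscador_alt linha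
instance (linha : String) (out : String) : Decidable (Spec_ofuscador linha out) := by unfold Spec_ofuscador; infer_instance

-- ===== CLAIM (what is proved, stated in full; the proofs are below) =====
def Claim_equal_ofuscador : Prop := ∀ (linha : String), Dom_ofuscador linha → Spec_ofuscador linha (ofuscador linha)

-- ===== LEMMAS AND PROOFS =====

-- simple structural model of linha.split(' '): (first word, remaining words)
def pvSp : List Char → List Char × List (List Char)
  | [] => ([], [])
  | c :: r =>
    let p := pvSp r
    if c = ' ' then ([], p.1 :: p.2) else (c :: p.1, p.2)

lemma pvSp_go :
    ∀ (fuel : Nat) (l cur : List Char) (accs : List (List Char)),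
      l.length ≤ fuel →
      PySem.Chars.splitOn.go [' '] fuel l cur accs =
        accs.reverse ++ (cur.reverse ++ (pvSp l).1) :: (pvSp l).2 := by
  intro fuel
  induction fuel with
  | zero =>
    intro l cur accs hl
    have hnil : l = [] := List.eq_nil_of_length_eq_zero (Nat.le_zero.mp hl)
    subst hnil
    rw [PySem.Chars.splitOn.go]
    simp [pvSp]
  | succ fuel ih =>
    intro l cur accs hl
    match l with
    | [] =>
      rw [PySem.Chars.splitOn.go]
      simp [pvSp]
      omega
    | c :: rest =>
      rw [PySem.Chars.splitOn.go]
      by_cases hc : c = ' '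
      · subst hc
        have hpre : ([' '] : List Char).isPrefixOf (' ' :: rest) = true := by
          simp [List.isPrefixOf]
        rw [if_pos hpre]
        have hlen : rest.length ≤ fuel := by
          simpa using Nat.succ_le_succ_iff.mp (by simpa using hl)
        simp only [List.length_singleton, List.drop_succ_cons, List.drop_zero]
        rw [ih _ _ _ hlen]
        simp [pvSp]
      · have hpre : ([' '] : List Char).isPrefixOf (c :: rest) = false := by
          simp [List.isPrefixOf]
          exact fun h => hc h.symm
        rw [if_neg (by simp [hpre])]
        have hlen : rest.length ≤ fuel := by
          simpa using Nat.succ_le_succ_iff.mp (by simpa using hl)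
        rw [ih _ _ _ hlen]
        simp [pvSp, hc]

lemma pvSplitOn_eq (l : List Char) :
    PySem.Chars.splitOn l [' '] = (pvSp l).1 :: (pvSp l).2 := by
  rw [PySem.Chars.splitOn, pvSp_go (l.length + 1) l [] [] (Nat.le_succ _)]
  simp

lemma pvSp_join (l : List Char) :
    (pvSp l).1 ++ (pvSp l).2.flatMap (fun w => ' ' :: w) = l := by
  induction l with
  | nil => rfl
  | cons c r ih =>
    simp only [pvSp]
    by_cases h : c = ' ' <;> simp [h, ih]

lemma pvSp_nospace (l : List Char) :
    (' ' ∉ (pvSp l).1) ∧ ∀ w ∈ (pvSp l).2, ' ' ∉ w := by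
  induction l with
  | nil => simp [pvSp]
  | cons c r ih =>
    simp only [pvSp]
    by_cases h : c = ' '
    · simpa [h] using ih
    · simp only [if_neg h]
      refine ⟨fun hm => ?_, ih.2⟩
      rcases List.mem_cons.mp hm with h1 | h1
      · exact h h1.symm
      · exact ih.1 h1

-- the word-interleaved shape of A's lista after the first loop
def pvChunks : List Char → List (List Char) → List (List Char)
  | _, [] => []
  | w, v :: vs => List.replicate w.length '*' :: (v.map pvEntryA ++ pvChunks v vs)

lemma pvFoldA_word (w : List Char) (lista2 : List (List Char))
    (acc : List (List Char)) (k : Int) (hw : ' ' ∉ w) :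
    w.foldl (pvStepA lista2) (acc, k) = (acc ++ w.map pvEntryA, k) := by
  induction w generalizing acc with
  | nil => simp
  | cons c r ih =>
    have hc : c ≠ ' ' := fun h => hw (h ▸ List.mem_cons_self)
    have hr : ' ' ∉ r := fun h => hw (List.mem_cons_of_mem _ h)
    simp only [List.foldl_cons, pvStepA, if_neg hc]
    rw [ih _ hr]
    simp

lemma pvFoldA_words :
    ∀ (ws : List (List Char)) (w0 : List Char) (pre acc : List (List Char)),
      (∀ w ∈ ws, ' ' ∉ w) → (' ' ∉ w0) →
      (w0 ++ ws.flatMap (fun w => ' ' :: w)).foldl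
          (pvStepA (pre ++ w0 :: ws)) (acc, (pre.length : Int))
        = (acc ++ w0.map pvEntryA ++ pvChunks w0 ws, (pre.length + ws.length : Int)) := by
  intro ws
  induction ws with
  | nil =>
    intro w0 pre acc _ hw0
    rw [List.flatMap_nil, List.append_nil, pvFoldA_word _ _ _ _ hw0]
    simp [pvChunks]
  | cons v vs ih =>
    intro w0 pre acc hws hw0
    have hv : ' ' ∉ v := hws v List.mem_cons_self
    have hvs : ∀ w ∈ vs, ' ' ∉ w := fun w hw => hws w (List.mem_cons_of_mem _ hw)
    rw [List.flatMap_cons, show (' ' :: v) ++ vs.flatMap (fun w => ' ' :: w)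
          = ' ' :: (v ++ vs.flatMap (fun w => ' ' :: w)) from rfl,
        List.foldl_append, pvFoldA_word _ _ _ _ hw0, List.foldl_cons]
    have hget : PySem.List.pyGetD (pre ++ w0 :: v :: vs) ((pre.length : Nat) : Int) [] = w0 := by
      rw [PySem.List.pyGetD_of_nonneg _ _ (by positivity)]
      simp [List.getD_eq_getElem?_getD]
    rw [show pvStepA (pre ++ w0 :: v :: vs) (acc ++ w0.map pvEntryA, (pre.length : Int)) ' '
          = (acc ++ w0.map pvEntryA ++ [List.replicate w0.length '*'],
              ((pre.length + 1 : Nat) : Int)) from by simp [pvStepA, hget]]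
    have harr : pre ++ w0 :: v :: vs = (pre ++ [w0]) ++ v :: vs := by simp
    rw [harr]
    have hstep := ih v (pre ++ [w0]) (acc ++ w0.map pvEntryA ++ [List.replicate w0.length '*']) hvs hv
    simp only [List.length_append, List.length_singleton] at hstep
    rw [hstep]
    simp only [Prod.mk.injEq]
    refine ⟨by simp [pvChunks], by push_cast [List.length_cons]; ring⟩

-- per-character agreement of (swap then leet) with B's single map, on ASCII
lemma pvChar_agree : ∀ n < 128,
    (match pvLeetA (pvEntryA (Char.ofNat n)) with
      | Sum.inl s => s | Sum.inr m => PySem.Int.toChars m) = [pvTrChar (Char.ofNat n)] := by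
  decide

lemma pvStar_leet (n : Nat) :
    pvLeetA (List.replicate n '*') = Sum.inl (List.replicate n '*') := by
  match n with
  | 0 => decide
  | 1 => decide
  | (m + 2) => simp [pvLeetA, List.replicate]

-- the common shape of the result, driven by the word list (prev word sizes the '*' runs)
def pvObf : List Char → List (List Char) → List Char
  | _, [] => []
  | w, v :: vs => List.replicate w.length '*' ++ v.map pvTrChar ++ pvObf v vs

lemma pvCharCode_lt {c : Char} (h : pvDomChar c = true) : c.toNat < 128 := by
  simp only [pvDomChar, Bool.or_eq_true, Bool.and_eq_true, decide_eq_true_eq,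
    beq_iff_eq] at h
  omega

lemma pvRender_entry {c : Char} (h : c.toNat < 128) :
    (match pvLeetA (pvEntryA c) with
      | Sum.inl s => s | Sum.inr m => PySem.Int.toChars m) = [pvTrChar c] := by
  have := pvChar_agree c.toNat h
  rwa [Char.ofNat_toNat] at this

lemma pvFlat_word (w : List Char) (hd : ∀ c ∈ w, c.toNat < 128) :
    (w.map pvEntryA).flatMap
        (fun e => match pvLeetA e with
          | Sum.inl s => s | Sum.inr m => PySem.Int.toChars m)
      = w.map pvTrChar := by
  rw [List.flatMap_map]
  induction w with
  | nil => rfl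
  | cons c r ih =>
    rw [List.flatMap_cons, pvRender_entry (hd c List.mem_cons_self),
      ih (fun c hc => hd c (List.mem_cons_of_mem _ hc))]
    rfl

lemma pvFlat_chunks :
    ∀ (ws : List (List Char)) (w0 : List Char),
      (∀ c ∈ w0, c.toNat < 128) → (∀ w ∈ ws, ∀ c ∈ w, c.toNat < 128) →
      (w0.map pvEntryA ++ pvChunks w0 ws).flatMap
          (fun e => match pvLeetA e with
            | Sum.inl s => s | Sum.inr m => PySem.Int.toChars m)
        = w0.map pvTrChar ++ pvObf w0 ws := by
  intro ws
  induction ws with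
  | nil =>
    intro w0 hd _
    rw [pvChunks, List.append_nil, pvFlat_word w0 hd, pvObf, List.append_nil]
  | cons v vs ih =>
    intro w0 hd hds
    rw [pvChunks, List.flatMap_append, pvFlat_word w0 hd, List.flatMap_cons,
      pvStar_leet, ih v (hds v List.mem_cons_self)
        (fun w hw => hds w (List.mem_cons_of_mem _ hw)), pvObf]
    simp

lemma pvTr_eq_map (w : List Char) : pvTr w = w.map pvTrChar := by
  rw [pvTr, PySem.List.foldl_append_singleton_eq_map]
  rfl

lemma pvZipFold :
    ∀ (ws : List (List Char)) (w : List Char) (acc : List Char),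
      ((w :: ws).zip ws).foldl
          (fun acc p => acc ++ List.replicate p.1.length '*' ++ pvTr p.2) acc
        = acc ++ pvObf w ws := by
  intro ws
  induction ws with
  | nil => intro w acc; simp [pvObf]
  | cons v vs ih =>
    intro w acc
    rw [List.zip_cons_cons, List.foldl_cons, ih v, pvObf, pvTr_eq_map]
    simp

theorem ofuscador_spec' (linha : String) (h : Dom_ofuscador linha) :
    ofuscador linha = ofuscador_alt linha := by
  have hdom : ∀ c ∈ linha.toList, c.toNat < 128 := by
    intro c hc
    have := List.all_eq_true.mp h c hc
    exact pvCharCode_lt this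
  simp only [ofuscador, ofuscador_alt, pvSplitOn_eq]
  set w0 := (pvSp linha.toList).1 with hw0def
  set ws := (pvSp linha.toList).2 with hwsdef
  have hcs : linha.toList = w0 ++ ws.flatMap (fun w => ' ' :: w) := (pvSp_join _).symm
  have hd0 : ∀ c ∈ w0, c.toNat < 128 := by
    intro c hc
    exact hdom c (by rw [hcs]; exact List.mem_append_left _ hc)
  have hds : ∀ w ∈ ws, ∀ c ∈ w, c.toNat < 128 := by
    intro w hw c hc
    refine hdom c ?_
    rw [hcs]
    exact List.mem_append_right _ (List.mem_flatMap.mpr ⟨w, hw, List.mem_cons_of_mem _ hc⟩)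
  have hfold := pvFoldA_words ws w0 [] []
    (fun w hw => (pvSp_nospace linha.toList).2 w hw) (pvSp_nospace linha.toList).1
  simp only [List.nil_append, List.length_nil, Nat.cast_zero] at hfold
  rw [hcs]
  have hlista : (List.foldl (pvStepA (w0 :: ws)) ([], 0)
        (w0 ++ ws.flatMap (fun w => ' ' :: w))).1
      = List.map pvEntryA w0 ++ pvChunks w0 ws := by rw [hfold]
  rw [PySem.List.foldl_append_eq_flatMap]
  rw [List.nil_append]
  rw [hlista]
  rw [List.flatMap_map]
  rw [pvFlat_chunks _ _ hd0 hds]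
  rw [pvZipFold, pvTr_eq_map]

-- ===== VERDICT (by name: the statement is the Claim_ definition above) =====
theorem ofuscador_spec : Claim_equal_ofuscador := by
  intro linha h
  exact ofuscador_spec' linha h
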